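-- pv_equiv track=rewrite | github.com/Alanoud-96/CRUK_datahub_landing_page | python_mapping/mapping_program_special.py | extract_input_labels
-- ===== SOURCE A (Python) =====
-- def extract_input_labels(dataset_filters):
--     cruk_label = None
--     topography_label = None
--     histology_label = None
--
--     for item in dataset_filters:
--         category = item.get("category")
--         label = item.get("label")
--
--         # Skip auto-generated crukTerms so that special rules only fire on
--         # original user-selected CRUK inputs, not on terms injected by a
--         # previous mapping pass (which would cause rules like "Men's cancer"
--         # to match datasets such as C51-C58 Female genital organs).
--         if category == "crukTerms" and cruk_label is None and not item.get("isGenerated"):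
--             cruk_label = label
--
--         elif category == "icdOTopography" and topography_label is None:
--             topography_label = label
--
--         elif category in {"icdOHistology", "icdOMorphology", "histology"} and histology_label is None:
--             histology_label = label
--
--     return cruk_label, topography_label, histology_label
-- ===== SOURCE B (Python) =====
-- _HISTOLOGY = {"icdOHistology", "icdOMorphology", "histology"}
--
--
-- def _first_label(dataset_filters, pred):
--     return next((item.get("label") for item in dataset_filters
--                  if pred(item) and item.get("label") is not None), None)
--
--
-- def extract_input_labels(dataset_filters):
--     cruk = _first_label(dataset_filters,
--                         lambda i: i.get("category") == "crukTerms" and not i.get("isGenerated"))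
--     topo = _first_label(dataset_filters,
--                         lambda i: i.get("category") == "icdOTopography")
--     hist = _first_label(dataset_filters,
--                         lambda i: i.get("category") in _HISTOLOGY)
--     return cruk, topo, hist
-- ===== Notes on version B (the rewrite author's own statement) =====
-- stated objective: idiomatic
-- what changed: A's single fused loop threading three mutable accumulators is replaced by three independent first-match generator searches (next(..., None)), one per category group, each returning the label of the first matching item that has a label.
import Mathlib
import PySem

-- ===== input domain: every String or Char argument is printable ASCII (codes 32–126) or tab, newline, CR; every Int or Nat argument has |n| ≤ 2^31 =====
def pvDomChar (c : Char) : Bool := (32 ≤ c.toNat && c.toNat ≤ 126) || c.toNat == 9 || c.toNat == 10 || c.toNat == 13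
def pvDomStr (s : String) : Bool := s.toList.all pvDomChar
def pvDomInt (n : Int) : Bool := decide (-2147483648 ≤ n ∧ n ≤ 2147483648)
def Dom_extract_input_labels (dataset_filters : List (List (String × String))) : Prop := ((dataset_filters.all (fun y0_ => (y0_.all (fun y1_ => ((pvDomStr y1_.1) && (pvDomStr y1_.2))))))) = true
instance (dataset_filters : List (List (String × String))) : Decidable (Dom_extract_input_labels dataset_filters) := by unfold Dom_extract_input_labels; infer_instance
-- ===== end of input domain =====

-- B replaces A's single fused loop with three accumulators by three independent
-- first-match searches (one per category group); objective: idiomatic decomposition.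

-- item.get(k) on an association-list dict (shared lookup primitive)
def pvGet (item : List (String × String)) (k : String) : Option String :=
  (PySem.Dict.mk item).get? k

-- ===== PORT A =====
-- Literal transliteration of A: one fold over the list carrying the three
-- accumulators (cruk_label, topography_label, histology_label); branches in
-- the same order.  'not item.get("isGenerated")' is true when the key is
-- absent or its (string) value is empty.
def extract_input_labels (dataset_filters : List (List (String × String))) : Option String × Option String × Option String :=
  dataset_filters.foldl
    (fun st item =>
      let category := pvGet item "category"
      let label := pvGet item "label"
      if category = some "crukTerms" ∧ st.1 = none ∧
          (pvGet item "isGenerated" = none ∨ pvGet item "isGenerated" = some "") then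
        (label, st.2.1, st.2.2)
      else if category = some "icdOTopography" ∧ st.2.1 = none then
        (st.1, label, st.2.2)
      else if (category = some "icdOHistology" ∨ category = some "icdOMorphology" ∨
               category = some "histology") ∧ st.2.2 = none then
        (st.1, st.2.1, label)
      else st)
    (none, none, none)

-- ===== PORT B =====
-- 'not item.get("isGenerated")' of Source B's crukTerms predicate
def pvNotGen (item : List (String × String)) : Bool :=
  ((pvGet item "isGenerated").getD "") == ""

def pvCrukPred (item : List (String × String)) : Bool :=
  (pvGet item "category" == some "crukTerms") && pvNotGen item

def pvTopoPred (item : List (String × String)) : Bool :=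
  pvGet item "category" == some "icdOTopography"

def pvHistPred (item : List (String × String)) : Bool :=
  let c := pvGet item "category"
  c == some "icdOHistology" || c == some "icdOMorphology" || c == some "histology"

-- Source B's _first_label: first item matching pred whose "label" key is present
def pvFirstLabel (pred : List (String × String) → Bool)
    (dataset_filters : List (List (String × String))) : Option String :=
  match dataset_filters.find? (fun i => pred i && (pvGet i "label").isSome) with
  | some i => pvGet i "label"
  | none => none

def extract_input_labels_alt (dataset_filters : List (List (String × String))) : Option String × Option String × Option String :=
  (pvFirstLabel pvCrukPred dataset_filters,
   pvFirstLabel pvTopoPred dataset_filters,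
   pvFirstLabel pvHistPred dataset_filters)

-- ===== PRECONDITION & SPEC =====
def Spec_extract_input_labels (dataset_filters : List (List (String × String))) (out : Option String × Option String × Option String) : Prop := out = extract_input_labels_alt dataset_filters
instance (dataset_filters : List (List (String × String))) (out : Option String × Option String × Option String) : Decidable (Spec_extract_input_labels dataset_filters out) := by unfold Spec_extract_input_labels; infer_instance

-- ===== CLAIM (what is proved, stated in full; the proofs are below) =====
def Claim_equal_extract_input_labels : Prop := ∀ (dataset_filters : List (List (String × String))), Dom_extract_input_labels dataset_filters → Spec_extract_input_labels dataset_filters (extract_input_labels dataset_filters)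

-- ===== LEMMAS AND PROOFS =====
theorem pvFirstLabel_cons (p : List (String × String) → Bool)
    (i : List (String × String)) (xs : List (List (String × String))) :
    pvFirstLabel p (i :: xs) =
      if p i && (pvGet i "label").isSome then pvGet i "label"
      else pvFirstLabel p xs := by
  by_cases h : p i && (pvGet i "label").isSome
  · simp [pvFirstLabel, List.find?, h]
  · simp [pvFirstLabel, List.find?, h]

theorem fold_eq (xs : List (List (String × String))) :
    ∀ c t h : Option String,
      List.foldl
        (fun st item =>
          let category := pvGet item "category"
          let label := pvGet item "label"
          if category = some "crukTerms" ∧ st.1 = none ∧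
              (pvGet item "isGenerated" = none ∨ pvGet item "isGenerated" = some "") then
            (label, st.2.1, st.2.2)
          else if category = some "icdOTopography" ∧ st.2.1 = none then
            (st.1, label, st.2.2)
          else if (category = some "icdOHistology" ∨ category = some "icdOMorphology" ∨
                   category = some "histology") ∧ st.2.2 = none then
            (st.1, st.2.1, label)
          else st)
        (c, t, h) xs =
      (c.or (pvFirstLabel pvCrukPred xs),
       t.or (pvFirstLabel pvTopoPred xs),
       h.or (pvFirstLabel pvHistPred xs)) := by
  induction xs with
  | nil => intro c t h; simp [pvFirstLabel]
  | cons i rest ih =>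
    intro c t h
    rw [List.foldl_cons]
    simp only
    split_ifs with h1 h2 h3
    · obtain ⟨hcat, hc, hgen⟩ := h1
      have hcruk : pvCrukPred i = true := by
        cases hg : pvGet i "isGenerated" <;>
          simp_all [pvCrukPred, pvNotGen]
      have htopo : pvTopoPred i = false := by simp [pvTopoPred, hcat]
      have hhist : pvHistPred i = false := by simp [pvHistPred, hcat]
      rw [ih, pvFirstLabel_cons, pvFirstLabel_cons, pvFirstLabel_cons]
      subst hc
      cases hl : pvGet i "label" <;> simp [hcruk, htopo, hhist, Option.or]
    · obtain ⟨hcat, ht⟩ := h2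
      have hcruk : pvCrukPred i = false := by simp [pvCrukPred, hcat]
      have htopo : pvTopoPred i = true := by simp [pvTopoPred, hcat]
      have hhist : pvHistPred i = false := by simp [pvHistPred, hcat]
      rw [ih, pvFirstLabel_cons, pvFirstLabel_cons, pvFirstLabel_cons]
      subst ht
      cases hl : pvGet i "label" <;> simp [hcruk, htopo, hhist, Option.or]
    · obtain ⟨hcat, hh⟩ := h3
      have hcruk : pvCrukPred i = false := by
        rcases hcat with hcat | hcat | hcat <;> simp [pvCrukPred, hcat]
      have htopo : pvTopoPred i = false := by
        rcases hcat with hcat | hcat | hcat <;> simp [pvTopoPred, hcat]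
      have hhist : pvHistPred i = true := by
        rcases hcat with hcat | hcat | hcat <;> simp [pvHistPred, hcat]
      rw [ih, pvFirstLabel_cons, pvFirstLabel_cons, pvFirstLabel_cons]
      subst hh
      cases hl : pvGet i "label" <;> simp [hcruk, htopo, hhist, Option.or]
    · -- no branch fired: the state is unchanged and none of the three
      -- searches can match this item under the current accumulators
      rw [ih, pvFirstLabel_cons, pvFirstLabel_cons, pvFirstLabel_cons]
      refine Prod.ext ?_ (Prod.ext ?_ ?_)
      · cases hc : c with
        | some v => simp [Option.or]
        | none =>
          have hP : (pvCrukPred i && (pvGet i "label").isSome) = false := by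
            by_contra hP
            simp only [Bool.not_eq_false, Bool.and_eq_true] at hP
            have := hP.1
            simp only [pvCrukPred, Bool.and_eq_true, beq_iff_eq] at this
            apply h1
            refine ⟨this.1, hc, ?_⟩
            cases hg : pvGet i "isGenerated" with
            | none => exact Or.inl rfl
            | some s =>
              right
              have := this.2
              simp [pvNotGen, hg] at this
              simp [this]
          simp [hP]
      · cases ht : t with
        | some v => simp [Option.or]
        | none =>
          have hT : pvTopoPred i = false := by
            by_contra hT
            simp only [Bool.not_eq_false, pvTopoPred, beq_iff_eq] at hT
            exact h2 ⟨hT, ht⟩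
          simp [hT]
      · cases hh : h with
        | some v => simp [Option.or]
        | none =>
          have hH : pvHistPred i = false := by
            by_contra hH
            simp only [Bool.not_eq_false, pvHistPred, Bool.or_eq_true, beq_iff_eq] at hH
            exact h3 ⟨by tauto, hh⟩
          simp [hH]

-- ===== VERDICT (by name: the statement is the Claim_ definition above) =====
theorem extract_input_labels_spec : Claim_equal_extract_input_labels := by
  intro xs _
  unfold Spec_extract_input_labels extract_input_labels extract_input_labels_alt
  rw [fold_eq]
  simp [Option.or]
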